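-- pv_equiv track=rewrite | github.com/KwokCheungYuk/DNA-RNA-Pattern-Matching | OnlineVersion/backend/main.py | calculate_ma
-- ===== SOURCE A (Python) =====
-- def calculate_ma(a, process_s, process_p, problem_type):
--     s_prime = []
--     p_prime = []
--     # Construct S‘
--     for item in process_s:
--         if a in item:
--             s_prime.append(1)
--         else:
--             s_prime.append(0)
--     # Construct P'
--     for item in process_p:
--         if a in item:
--             p_prime.append(1)
--         else:
--             p_prime.append(0)
--         # Construct Ma
--         Ma = []
--         for i in range(0, len(s_prime) - len(p_prime) + 1):
--             bitwise_and = []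
--             sub_s_prime = []
--             for k in range(0, len(p_prime)):
--                 bitwise_and.append(p_prime[k] & s_prime[i + k])
--                 sub_s_prime.append(s_prime[i + k])
--             # problem 1: degenerate text T and a pattern P.
--             if problem_type == 1:
--                 if bitwise_and == p_prime:
--                     Ma.append(1)
--                 else:
--                     Ma.append(0)
--             # problem 2: text T and a degenerate pattern P.
--             elif problem_type == 2:
--                 if bitwise_and == sub_s_prime:
--                     Ma.append(1)
--                 else:
--                     Ma.append(0)
--     return Ma
-- ===== SOURCE B (Python) =====
-- def calculate_ma(a, process_s, process_p, problem_type):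
--     # One pass: build both indicator vectors once, then test each shift directly
--     # (A rebuilds Ma from scratch for every pattern item; only the last rebuild matters).
--     if problem_type != 1 and problem_type != 2:
--         return []
--     s_prime = [1 if a in item else 0 for item in process_s]
--     p_prime = [1 if a in item else 0 for item in process_p]
--     m = len(p_prime)
--     if problem_type == 1:
--         return [1 if all(s_prime[i + k] for k in range(m) if p_prime[k]) else 0
--                 for i in range(len(s_prime) - m + 1)]
--     else:
--         return [1 if all(p_prime[k] for k in range(m) if s_prime[i + k]) else 0
--                 for i in range(len(s_prime) - m + 1)]
-- ===== Notes on version B (the rewrite author's own statement) =====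
-- stated objective: faster
-- what changed: B builds the two 0/1 indicator vectors once and tests each shift directly with an early-exiting all() over the pattern positions, instead of A's rebuilding of the whole Ma vector (with explicit bitwise-and lists) from scratch inside the loop over every pattern item.
import Mathlib
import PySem

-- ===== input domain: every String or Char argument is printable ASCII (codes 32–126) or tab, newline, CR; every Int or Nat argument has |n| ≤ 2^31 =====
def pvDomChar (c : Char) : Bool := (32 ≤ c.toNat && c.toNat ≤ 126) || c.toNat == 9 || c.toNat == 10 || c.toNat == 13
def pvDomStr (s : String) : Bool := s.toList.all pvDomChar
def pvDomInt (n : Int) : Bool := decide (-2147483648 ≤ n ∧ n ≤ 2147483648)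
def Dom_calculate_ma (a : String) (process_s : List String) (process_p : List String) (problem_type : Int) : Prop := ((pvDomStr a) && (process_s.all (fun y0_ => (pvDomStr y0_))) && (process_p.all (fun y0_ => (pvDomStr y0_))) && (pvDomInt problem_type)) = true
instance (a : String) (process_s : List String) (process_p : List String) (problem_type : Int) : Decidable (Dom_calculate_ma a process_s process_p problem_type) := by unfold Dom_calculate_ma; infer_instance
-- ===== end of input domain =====

-- B hoists the Ma construction out of A's loop over the pattern items (only the last rebuild
-- matters) and tests each shift with an early-exiting all-check: objective 'faster' (asymptotic).

-- ===== PORT A =====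
-- 'a in item' (substring test)
def pvInd (a item : String) : Int := if PySem.Str.isIn a item then 1 else 0

-- the Ma construction A performs anew after appending each pattern bit
def pvBuildMa (problem_type : Int) (s_prime p_prime : List Int) : List Int :=
  (PySem.List.pyRange 0 ((s_prime.length : Int) - (p_prime.length : Int) + 1) 1).foldl
    (fun Ma i =>
      let bs := (PySem.List.pyRange 0 (p_prime.length : Int) 1).foldl
        (fun (bs : List Int × List Int) k =>
          (bs.1 ++ [PySem.Int.band (PySem.List.pyGetD p_prime k 0) (PySem.List.pyGetD s_prime (i + k) 0)],
           bs.2 ++ [PySem.List.pyGetD s_prime (i + k) 0])) ([], [])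
      if problem_type = 1 then
        Ma ++ [if bs.1 == p_prime then (1 : Int) else 0]
      else if problem_type = 2 then
        Ma ++ [if bs.1 == bs.2 then (1 : Int) else 0]
      else Ma) []

def calculate_ma (a : String) (process_s : List String) (process_p : List String) (problem_type : Int) : List Int :=
  let s_prime := process_s.foldl (fun acc item => acc ++ [pvInd a item]) []
  -- the P' loop: appends the bit for item, then rebuilds Ma from the current p_prime;
  -- for empty process_p Python raises UnboundLocalError (excluded by Pre_)
  (process_p.foldl
    (fun (st : List Int × List Int) item =>
      (st.1 ++ [pvInd a item], pvBuildMa problem_type s_prime (st.1 ++ [pvInd a item])))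
    (([], []) : List Int × List Int)).2

-- ===== PORT B =====
-- Source B: indicator vectors once, then per shift an all-check over the pattern positions
def pvMaAlt (problem_type : Int) (s_prime p_prime : List Int) : List Int :=
  if problem_type ≠ 1 ∧ problem_type ≠ 2 then []
  else if problem_type = 1 then
    (PySem.List.pyRange 0 ((s_prime.length : Int) - (p_prime.length : Int) + 1) 1).map
      (fun i =>
        if (PySem.List.pyRange 0 (p_prime.length : Int) 1).all
             (fun k => (PySem.List.pyGetD p_prime k 0 == 0) ||
                       !(PySem.List.pyGetD s_prime (i + k) 0 == 0))
        then (1 : Int) else 0)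
  else
    (PySem.List.pyRange 0 ((s_prime.length : Int) - (p_prime.length : Int) + 1) 1).map
      (fun i =>
        if (PySem.List.pyRange 0 (p_prime.length : Int) 1).all
             (fun k => (PySem.List.pyGetD s_prime (i + k) 0 == 0) ||
                       !(PySem.List.pyGetD p_prime k 0 == 0))
        then (1 : Int) else 0)

def calculate_ma_alt (a : String) (process_s : List String) (process_p : List String) (problem_type : Int) : List Int :=
  pvMaAlt problem_type (process_s.map (pvInd a)) (process_p.map (pvInd a))

-- ===== PRECONDITION & SPEC =====
-- Pre_ excludes exactly empty process_p, on which Python A raises UnboundLocalError (Ma never assigned).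
def Pre_calculate_ma (a : String) (process_s : List String) (process_p : List String) (problem_type : Int) : Prop :=
  process_p ≠ []
instance (a : String) (process_s : List String) (process_p : List String) (problem_type : Int) : Decidable (Pre_calculate_ma a process_s process_p problem_type) := by unfold Pre_calculate_ma; infer_instance
def pvWitness_calculate_ma : String × List String × List String × Int := ("a", ["ab", "b", "a"], ["a"], 1)

def Spec_calculate_ma (a : String) (process_s : List String) (process_p : List String) (problem_type : Int) (out : List Int) : Prop := out = calculate_ma_alt a process_s process_p problem_type
instance (a : String) (process_s : List String) (process_p : List String) (problem_type : Int) (out : List Int) : Decidable (Spec_calculate_ma a process_s process_p problem_type out) := by unfold Spec_calculate_ma; infer_instance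

-- ===== CLAIM (what is proved, stated in full; the proofs are below) =====
def Claim_equal_calculate_ma : Prop := ∀ (a : String) (process_s : List String) (process_p : List String) (problem_type : Int), Dom_calculate_ma a process_s process_p problem_type → Pre_calculate_ma a process_s process_p problem_type → Spec_calculate_ma a process_s process_p problem_type (calculate_ma a process_s process_p problem_type)

-- ===== LEMMAS AND PROOFS =====

-- values of pvInd are bits
theorem pvInd_bit (a item : String) : pvInd a item = 0 ∨ pvInd a item = 1 := by
  unfold pvInd; split <;> simp

-- A's fold over process_p: only the last rebuild of Ma survives
theorem pvFoldP (a : String) (t : Int) (s' : List Int) :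
    ∀ (P : List String) (p0 M0 : List Int), P ≠ [] →
      P.foldl (fun (st : List Int × List Int) item =>
          (st.1 ++ [pvInd a item], pvBuildMa t s' (st.1 ++ [pvInd a item]))) (p0, M0)
        = (p0 ++ P.map (pvInd a), pvBuildMa t s' (p0 ++ P.map (pvInd a))) := by
  intro P
  induction P with
  | nil => intro _ _ h; exact absurd rfl h
  | cons x xs ih =>
      intro p0 M0 _
      by_cases hxs : xs = []
      · subst hxs; simp
      · simp only [List.foldl_cons]
        rw [ih (p0 ++ [pvInd a x]) _ hxs]
        simp

-- bit arithmetic of Python's '&' on 0/1 values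
theorem pv_band_left (p s : Int) (hp : p = 0 ∨ p = 1) (hs : s = 0 ∨ s = 1) :
    (PySem.Int.band p s == p) = ((p == 0) || !(s == 0)) := by
  rcases hp with h | h <;> rcases hs with h2 | h2 <;> subst h <;> subst h2 <;> decide

theorem pv_band_right (p s : Int) (hp : p = 0 ∨ p = 1) (hs : s = 0 ∨ s = 1) :
    (PySem.Int.band p s == s) = ((s == 0) || !(p == 0)) := by
  rcases hp with h | h <;> rcases hs with h2 | h2 <;> subst h <;> subst h2 <;> decide

-- the per-shift core: A's rebuilt Ma equals B's all-checked vector on bit lists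
theorem pvBuildMa_eq_alt (t : Int) (s' p' : List Int)
    (hs : ∀ x ∈ s', x = 0 ∨ x = 1) (hp : ∀ x ∈ p', x = 0 ∨ x = 1) :
    pvBuildMa t s' p' = pvMaAlt t s' p' := by
  have hinner : ∀ i : Int,
      (PySem.List.pyRange 0 (p'.length : Int) 1).foldl
        (fun (bs : List Int × List Int) k =>
          (bs.1 ++ [PySem.Int.band (PySem.List.pyGetD p' k 0) (PySem.List.pyGetD s' (i + k) 0)],
           bs.2 ++ [PySem.List.pyGetD s' (i + k) 0])) ([], [])
      = ((PySem.List.pyRange 0 (p'.length : Int) 1).map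
           (fun k => PySem.Int.band (PySem.List.pyGetD p' k 0) (PySem.List.pyGetD s' (i + k) 0)),
         (PySem.List.pyRange 0 (p'.length : Int) 1).map
           (fun k => PySem.List.pyGetD s' (i + k) 0)) := by
    intro i
    rw [PySem.List.foldl_prod_mk
         (f := fun acc k => acc ++ [PySem.Int.band (PySem.List.pyGetD p' k 0) (PySem.List.pyGetD s' (i + k) 0)])
         (g := fun acc k => acc ++ [PySem.List.pyGetD s' (i + k) 0])]
    rw [PySem.List.foldl_append_singleton_eq_map, PySem.List.foldl_append_singleton_eq_map]
    simp
  have hpget : ∀ k : Int, 0 ≤ k → k < (p'.length : Int) →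
      PySem.List.pyGetD p' k 0 = 0 ∨ PySem.List.pyGetD p' k 0 = 1 := by
    intro k h0 h1
    rw [PySem.List.pyGetD_eq_getElem p' 0 h0 h1]
    exact hp _ (List.getElem_mem _)
  have hsget : ∀ j : Int, 0 ≤ j → j < (s'.length : Int) →
      PySem.List.pyGetD s' j 0 = 0 ∨ PySem.List.pyGetD s' j 0 = 1 := by
    intro j h0 h1
    rw [PySem.List.pyGetD_eq_getElem s' 0 h0 h1]
    exact hs _ (List.getElem_mem _)
  have hpeq : (PySem.List.pyRange 0 (p'.length : Int) 1).map
      (fun k => PySem.List.pyGetD p' k 0) = p' := PySem.List.map_pyGetD_pyRange_zero' p' 0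
  by_cases h1 : t = 1
  · subst h1
    unfold pvBuildMa pvMaAlt
    simp only [hinner, Int.reduceEq, ne_eq, reduceIte, not_false_eq_true, and_self, and_true, true_and, not_true_eq_false, and_false, false_and, if_true, if_false]
    rw [PySem.List.foldl_append_singleton_eq_map]
    rw [List.nil_append]
    apply List.map_congr_left
    intro i hi
    obtain ⟨hi0, hi1⟩ := (PySem.List.mem_pyRange_one).mp hi
    have hcond : ((PySem.List.pyRange 0 (p'.length : Int) 1).map
          (fun k => PySem.Int.band (PySem.List.pyGetD p' k 0) (PySem.List.pyGetD s' (i + k) 0)) == p')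
        = ((PySem.List.pyRange 0 (p'.length : Int) 1).all
          (fun k => (PySem.List.pyGetD p' k 0 == 0) || !(PySem.List.pyGetD s' (i + k) 0 == 0))) := by
      rw [Bool.eq_iff_iff, beq_iff_eq, List.all_eq_true]
      conv_lhs => rhs; rw [← hpeq]
      rw [List.map_inj_left]
      apply forall_congr'; intro k
      apply imp_congr_right; intro hk
      obtain ⟨hk0, hk1⟩ := (PySem.List.mem_pyRange_one).mp hk
      have hb := pv_band_left (PySem.List.pyGetD p' k 0) (PySem.List.pyGetD s' (i + k) 0)
        (hpget k hk0 hk1) (hsget (i + k) (by omega) (by omega))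
      rw [← beq_iff_eq (a := PySem.Int.band (PySem.List.pyGetD p' k 0) (PySem.List.pyGetD s' (i + k) 0))]
      rw [hb]
    rw [hcond]
  · by_cases h2 : t = 2
    · subst h2
      unfold pvBuildMa pvMaAlt
      simp only [hinner, Int.reduceEq, ne_eq, reduceIte, not_false_eq_true, and_self, and_true, true_and, not_true_eq_false, and_false, false_and, if_true, if_false]
      rw [PySem.List.foldl_append_singleton_eq_map]
      rw [List.nil_append]
      apply List.map_congr_left
      intro i hi
      obtain ⟨hi0, hi1⟩ := (PySem.List.mem_pyRange_one).mp hi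
      have hcond : ((PySem.List.pyRange 0 (p'.length : Int) 1).map
            (fun k => PySem.Int.band (PySem.List.pyGetD p' k 0) (PySem.List.pyGetD s' (i + k) 0))
          == (PySem.List.pyRange 0 (p'.length : Int) 1).map
            (fun k => PySem.List.pyGetD s' (i + k) 0))
          = ((PySem.List.pyRange 0 (p'.length : Int) 1).all
            (fun k => (PySem.List.pyGetD s' (i + k) 0 == 0) || !(PySem.List.pyGetD p' k 0 == 0))) := by
        rw [Bool.eq_iff_iff, beq_iff_eq, List.map_inj_left, List.all_eq_true]
        apply forall_congr'; intro k
        apply imp_congr_right; intro hk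
        obtain ⟨hk0, hk1⟩ := (PySem.List.mem_pyRange_one).mp hk
        have hb := pv_band_right (PySem.List.pyGetD p' k 0) (PySem.List.pyGetD s' (i + k) 0)
          (hpget k hk0 hk1) (hsget (i + k) (by omega) (by omega))
        rw [← beq_iff_eq (a := PySem.Int.band (PySem.List.pyGetD p' k 0) (PySem.List.pyGetD s' (i + k) 0))]
        rw [hb]
      rw [hcond]
    · unfold pvBuildMa pvMaAlt
      simp only [if_neg h1, if_neg h2, if_pos (And.intro h1 h2)]
      exact List.foldl_fixed _

-- ===== VERDICT (by name: the statement is the Claim_ definition above) =====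
theorem calculate_ma_spec : Claim_equal_calculate_ma := by
  intro a S P t _hdom hpre
  unfold Spec_calculate_ma calculate_ma_alt
  simp only [calculate_ma, PySem.List.foldl_append_singleton_eq_map, List.nil_append]
  rw [pvFoldP a t _ P [] [] hpre]
  simp only [List.nil_append]
  exact pvBuildMa_eq_alt t _ _
    (by intro x hx; rcases List.mem_map.mp hx with ⟨y, _, rfl⟩; exact pvInd_bit a y)
    (by intro x hx; rcases List.mem_map.mp hx with ⟨y, _, rfl⟩; exact pvInd_bit a y)
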